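-- pv_equiv track=rewrite | github.com/Lewisboi/advent-of-code-2024 | Python/day_4/part_one/main.py | searchable_lines
-- ===== SOURCE A (Python) =====
-- def searchable_lines(map_: list[list[str]]) -> list[str]:
--     # Rows as strings
--     rows: list[str] = ["".join(line) for line in map_]
--
--     # Columns as strings
--     cols: list[str] = [
--         "".join(map_[i][j] for i in range(len(map_))) for j in range(len(map_[0]))
--     ]
--
--     # Helper to get diagonals
--     def get_diagonal(start_row: int, start_col: int, direction: tuple[int, int]) -> str:
--         diagonal: list[str] = []
--         rows, cols = len(map_), len(map_[0])
--         row, col = start_row, start_col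
--         while 0 <= row < rows and 0 <= col < cols:
--             diagonal.append(map_[row][col])
--             row, col = row + direction[0], col + direction[1]
--         return "".join(diagonal)
--
--     def reverse_string(string: str) -> str:
--         return "".join(reversed(string))
--
--     # Diagonals: Top-left to bottom-right
--     diagonals: list[str] = []
--     rows_count, cols_count = len(map_), len(map_[0])
--     for col in range(cols_count):
--         diagonals.append(get_diagonal(0, col, (1, 1)))
--     for row in range(1, rows_count):
--         diagonals.append(get_diagonal(row, 0, (1, 1)))
--
--     # Diagonals: Bottom-left to top-right
--     for col in range(cols_count):
--         diagonals.append(get_diagonal(rows_count - 1, col, (-1, 1)))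
--     for row in range(rows_count - 2, -1, -1):
--         diagonals.append(get_diagonal(row, 0, (-1, 1)))
--
--     return (
--         rows
--         + cols
--         + diagonals
--         + list(map(reverse_string, rows))
--         + list(map(reverse_string, cols))
--         + list(map(reverse_string, diagonals))
--     )
-- ===== SOURCE B (Python) =====
-- def searchable_lines(map_: list[list[str]]) -> list[str]:
--     h, w = len(map_), len(map_[0])
--
--     # One flat pass over all cells (i, j) with j < w.
--     cells = [(i, j, line[j]) for i, line in enumerate(map_) for j in range(w)]
--
--     # Bucket the cells of the single pass by a key of (i, j).
--     def bucket(key):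
--         d: dict[int, list[str]] = {}
--         for i, j, ch in cells:
--             d.setdefault(key(i, j), []).append(ch)
--         return d
--
--     colb = bucket(lambda i, j: j)        # columns,        key j
--     tlb = bucket(lambda i, j: i - j)     # TL-BR diagonals, key i - j
--     blb = bucket(lambda i, j: i + j)     # BL-TR diagonals, key i + j
--
--     rows = ["".join(line) for line in map_]
--     cols = ["".join(colb.get(j, [])) for j in range(w)]
--     diagonals = (
--         ["".join(tlb.get(-c, [])) for c in range(w)]
--         + ["".join(tlb.get(r, [])) for r in range(1, h)]
--         + ["".join(reversed(blb.get(h - 1 + c, []))) for c in range(w)]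
--         + ["".join(reversed(blb.get(r, []))) for r in range(h - 2, -1, -1)]
--     )
--     base = rows + cols + diagonals
--     return base + [s[::-1] for s in base]
-- ===== Notes on version B (the rewrite author's own statement) =====
-- stated objective: alternative
-- what changed: A walks every diagonal with a separate bounds-checked while loop from its start cell; B makes one flat pass over all cells and buckets them into dictionaries keyed by j, i-j and i+j, then emits the buckets in A's order, with columns read from a bucket instead of an index scan and reversals done by slicing.
import Mathlib
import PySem

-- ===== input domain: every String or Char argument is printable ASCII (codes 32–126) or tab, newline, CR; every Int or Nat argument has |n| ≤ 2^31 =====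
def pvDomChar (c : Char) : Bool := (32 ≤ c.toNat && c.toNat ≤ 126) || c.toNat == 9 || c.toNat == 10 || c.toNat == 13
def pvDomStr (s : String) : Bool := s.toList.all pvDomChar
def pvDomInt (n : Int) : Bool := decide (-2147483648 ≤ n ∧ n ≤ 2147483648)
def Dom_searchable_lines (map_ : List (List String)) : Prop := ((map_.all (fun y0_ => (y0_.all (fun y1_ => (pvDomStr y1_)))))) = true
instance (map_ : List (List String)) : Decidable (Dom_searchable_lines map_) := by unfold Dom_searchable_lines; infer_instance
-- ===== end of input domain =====

-- B replaces A's per-diagonal while-loop walks by a single flat pass over all cells bucketed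
-- into dictionaries keyed by j, i-j and i+j (objective: alternative decomposition, same cost).

-- ===== PORT A =====
-- A's inner while loop of get_diagonal; the fuel argument only makes the recursion
-- structural (call sites pass more fuel than the loop can ever take steps, since dir.2 = 1).
def pvGetDiag (map_ : List (List String)) (fuel : Nat) (row col : Int) (dir : Int × Int) :
    List String :=
  match fuel with
  | 0 => []
  | n + 1 =>
    if 0 ≤ row ∧ row < (map_.length : Int) ∧ 0 ≤ col ∧
        col < ((PySem.List.pyGetD map_ 0 []).length : Int) then
      PySem.List.pyGetD (PySem.List.pyGetD map_ row []) col "" ::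
        pvGetDiag map_ n (row + dir.1) (col + dir.2) dir
    else []

-- "".join(reversed(string))
def pvRevA (s : String) : String :=
  PySem.Str.join "" (s.toList.reverse.map (fun ch => String.ofList [ch]))

def searchable_lines (map_ : List (List String)) : List String :=
  let rows : List String := map_.map (fun line => PySem.Str.join "" line)
  let rows_count : Int := (map_.length : Int)
  let cols_count : Int := ((PySem.List.pyGetD map_ 0 []).length : Int)
  let cols : List String := (PySem.List.pyRange 0 cols_count 1).map (fun j =>
    PySem.Str.join "" ((PySem.List.pyRange 0 rows_count 1).map (fun i =>
      PySem.List.pyGetD (PySem.List.pyGetD map_ i []) j "")))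
  let fuel : Nat := cols_count.toNat + 1
  let diagonals : List String :=
    (PySem.List.pyRange 0 cols_count 1).map (fun col =>
      PySem.Str.join "" (pvGetDiag map_ fuel 0 col (1, 1)))
    ++ (PySem.List.pyRange 1 rows_count 1).map (fun row =>
      PySem.Str.join "" (pvGetDiag map_ fuel row 0 (1, 1)))
    ++ (PySem.List.pyRange 0 cols_count 1).map (fun col =>
      PySem.Str.join "" (pvGetDiag map_ fuel (rows_count - 1) col (-1, 1)))
    ++ (PySem.List.pyRange (rows_count - 2) (-1) (-1)).map (fun row =>
      PySem.Str.join "" (pvGetDiag map_ fuel row 0 (-1, 1)))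
  rows ++ cols ++ diagonals
    ++ rows.map pvRevA ++ cols.map pvRevA ++ diagonals.map pvRevA

-- ===== PORT B =====
-- d.setdefault(key(i, j), []).append(ch) over the flat cell list
def pvBucket (cells : List (Int × Int × String)) (key : Int → Int → Int) :
    PySem.Dict Int (List String) :=
  cells.foldl (fun d c => d.modify (key c.1 c.2.1) [] (· ++ [c.2.2])) PySem.Dict.empty

def searchable_lines_alt (map_ : List (List String)) : List String :=
  let h : Int := (map_.length : Int)
  let w : Int := ((PySem.List.pyGetD map_ 0 []).length : Int)
  let cells : List (Int × Int × String) := (PySem.List.enumerate map_).flatMap (fun p =>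
    (PySem.List.pyRange 0 w 1).map (fun j => (p.1, j, PySem.List.pyGetD p.2 j "")))
  let colb := pvBucket cells (fun _ j => j)
  let tlb := pvBucket cells (fun i j => i - j)
  let blb := pvBucket cells (fun i j => i + j)
  let rows : List String := map_.map (fun line => PySem.Str.join "" line)
  let cols : List String := (PySem.List.pyRange 0 w 1).map (fun j =>
    PySem.Str.join "" (colb.getD j []))
  let diagonals : List String :=
    (PySem.List.pyRange 0 w 1).map (fun c => PySem.Str.join "" (tlb.getD (-c) []))
    ++ (PySem.List.pyRange 1 h 1).map (fun r => PySem.Str.join "" (tlb.getD r []))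
    ++ (PySem.List.pyRange 0 w 1).map (fun c =>
      PySem.Str.join "" ((blb.getD (h - 1 + c) []).reverse))
    ++ (PySem.List.pyRange (h - 2) (-1) (-1)).map (fun r =>
      PySem.Str.join "" ((blb.getD r []).reverse))
  let base : List String := rows ++ cols ++ diagonals
  base ++ base.map (fun s => (PySem.Str.slice? s none none (-1)).getD "")

-- ===== PRECONDITION & SPEC =====
-- Pre_ excludes exactly the inputs where A raises IndexError: the empty grid (len(map_[0]))
-- and grids with a row shorter than the first row (indexed past its end by cols/diagonals).
def Pre_searchable_lines (map_ : List (List String)) : Prop :=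
  map_ ≠ [] ∧ ∀ line ∈ map_, (map_.headD []).length ≤ line.length
instance (map_ : List (List String)) : Decidable (Pre_searchable_lines map_) := by
  unfold Pre_searchable_lines; infer_instance

def pvWitness_searchable_lines : List (List String) :=
  [["a", "b", "c"], ["d", "e", "f"]]

def Spec_searchable_lines (map_ : List (List String)) (out : List String) : Prop :=
  out = searchable_lines_alt map_
instance (map_ : List (List String)) (out : List String) :
    Decidable (Spec_searchable_lines map_ out) := by
  unfold Spec_searchable_lines; infer_instance

-- ===== CLAIM (what is proved, stated in full; the proofs are below) =====
def Claim_equal_searchable_lines : Prop := ∀ (map_ : List (List String)),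
  Dom_searchable_lines map_ → Pre_searchable_lines map_ →
    Spec_searchable_lines map_ (searchable_lines map_)

-- ===== LEMMAS AND PROOFS =====

-- the cell value map_[i][j] (both ports read it through pyGetD with defaults)
def pvVal (map_ : List (List String)) (i j : Int) : String :=
  PySem.List.pyGetD (PySem.List.pyGetD map_ i []) j ""

lemma pvRevA_eq (s : String) : pvRevA s = (PySem.Str.slice? s none none (-1)).getD "" := by
  rw [PySem.Str.slice?_none_none_neg_one]
  apply String.toList_inj.mp
  simp only [pvRevA, PySem.Str.toList_join, List.map_map]
  rw [show (String.toList ∘ fun ch => String.ofList [ch]) = (fun x : Char => [x]) from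
    funext (fun c => by simp)]
  simpa using PySem.Chars.join_nil_singletons s.toList.reverse

lemma pvBucket_getD (cells : List (Int × Int × String)) (key : Int → Int → Int) (k : Int) :
    (pvBucket cells key).getD k [] =
      (cells.filter (fun c => key c.1 c.2.1 == k)).map (fun c => c.2.2) := by
  unfold pvBucket
  rw [show List.foldl (fun (d : PySem.Dict Int (List String)) (c : Int × Int × String) =>
        d.modify (key c.1 c.2.1) [] (· ++ [c.2.2])) PySem.Dict.empty cells
      = List.foldl (fun (d : PySem.Dict Int (List String)) (p : Int × String) =>
        d.modify p.1 [] (· ++ [p.2])) PySem.Dict.empty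
        (cells.map (fun c => (key c.1 c.2.1, c.2.2)))
      from (List.foldl_map (f := fun c : Int × Int × String => (key c.1 c.2.1, c.2.2))
        (g := fun (d : PySem.Dict Int (List String)) (p : Int × String) =>
          d.modify p.1 [] (· ++ [p.2])) (l := cells) (init := PySem.Dict.empty)).symm]
  rw [PySem.Dict.getD_foldl_modify_append]
  simp [List.filter_map, Function.comp_def]

lemma filter_single (w t : Int) (p : Int → Bool) (hp : ∀ x, p x = decide (x = t)) :
    (PySem.List.pyRange 0 w 1).filter p = if 0 ≤ t ∧ t < w then [t] else [] := by
  split_ifs with h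
  · rw [PySem.List.pyRange_one_append 0 t w h.1 (le_of_lt h.2),
      PySem.List.pyRange_one_cons h.2, List.filter_append, List.filter_cons]
    have h1 : (PySem.List.pyRange 0 t 1).filter p = [] :=
      List.filter_eq_nil_iff.mpr (fun x hx => by
        have := (PySem.List.mem_pyRange_one).mp hx
        simp [hp]; omega)
    have h2 : (PySem.List.pyRange (t+1) w 1).filter p = [] :=
      List.filter_eq_nil_iff.mpr (fun x hx => by
        have := (PySem.List.mem_pyRange_one).mp hx
        simp [hp]; omega)
    rw [h1, h2]; simp [hp]
  · exact List.filter_eq_nil_iff.mpr (fun x hx => by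
      have := (PySem.List.mem_pyRange_one).mp hx
      simp [hp]; omega)

lemma window_flatMap {α : Type} (a b lo hi : Int) (f : Int → α) (P : Int → Prop)
    [DecidablePred P] (hP : ∀ i, P i ↔ (lo ≤ i ∧ i < hi)) :
    (PySem.List.pyRange a b 1).flatMap (fun i => if P i then [f i] else [])
      = (PySem.List.pyRange (max a lo) (min b hi) 1).map f := by
  by_cases hlh : max a lo ≤ min b hi
  · rw [PySem.List.pyRange_one_append a (max a lo) b (le_max_left a lo) (by omega),
      PySem.List.pyRange_one_append (max a lo) (min b hi) b hlh (by omega),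
      List.flatMap_append, List.flatMap_append]
    have h1 : (PySem.List.pyRange a (max a lo) 1).flatMap
        (fun i => if P i then [f i] else []) = [] :=
      List.flatMap_eq_nil_iff.mpr (fun x hx => by
        have := (PySem.List.mem_pyRange_one).mp hx
        rw [if_neg]; rw [hP]; omega)
    have h2 : (PySem.List.pyRange (min b hi) b 1).flatMap
        (fun i => if P i then [f i] else []) = [] :=
      List.flatMap_eq_nil_iff.mpr (fun x hx => by
        have := (PySem.List.mem_pyRange_one).mp hx
        rw [if_neg]; rw [hP]; omega)
    have h3 : (PySem.List.pyRange (max a lo) (min b hi) 1).flatMap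
          (fun i => if P i then [f i] else [])
        = (PySem.List.pyRange (max a lo) (min b hi) 1).flatMap (fun i => [f i]) :=
      List.flatMap_congr (fun x hx => by
        have := (PySem.List.mem_pyRange_one).mp hx
        rw [if_pos]; rw [hP]; omega)
    rw [h1, h2, h3]; simp [← List.map_eq_flatMap]
  · rw [PySem.List.pyRange_one_eq_nil (a := max a lo) (b := min b hi) (by omega), List.map_nil]
    exact List.flatMap_eq_nil_iff.mpr (fun x hx => by
      have := (PySem.List.mem_pyRange_one).mp hx
      rw [if_neg]; rw [hP]; omega)

lemma bucket_range (map_ : List (List String)) (key : Int → Int → Int) (k : Int)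
    (t : Int → Int) (lo hi : Int)
    (hkey : ∀ i x, (key i x == k) = decide (x = t i))
    (hwin : ∀ i, (0 ≤ t i ∧ t i < ((PySem.List.pyGetD map_ 0 []).length : Int))
      ↔ (lo ≤ i ∧ i < hi)) :
    (pvBucket ((PySem.List.enumerate map_).flatMap (fun p =>
        (PySem.List.pyRange 0 ((PySem.List.pyGetD map_ 0 []).length : Int) 1).map
          (fun j => (p.1, j, PySem.List.pyGetD p.2 j "")))) key).getD k []
    = (PySem.List.pyRange (max 0 lo) (min (map_.length : Int) hi) 1).map
        (fun i => pvVal map_ i (t i)) := by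
  rw [pvBucket_getD, PySem.List.enumerate_eq_map_pyRange map_ [],
    List.flatMap_map, List.filter_flatMap, List.map_flatMap]
  have hbody : ∀ x ∈ PySem.List.pyRange 0 (PySem.List.len map_) 1,
      ((( PySem.List.pyRange 0 ((PySem.List.pyGetD map_ 0 []).length : Int) 1).map
          (fun j => (x, j, PySem.List.pyGetD (PySem.List.pyGetD map_ x []) j ""))).filter
            (fun c => key c.1 c.2.1 == k)).map (fun c => c.2.2)
      = if (0 ≤ t x ∧ t x < ((PySem.List.pyGetD map_ 0 []).length : Int))
          then [pvVal map_ x (t x)] else [] := by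
    intro x hx
    rw [List.filter_map,
      filter_single ((PySem.List.pyGetD map_ 0 []).length : Int) (t x) _
        (fun j => by simpa using hkey x j)]
    split_ifs <;> simp [pvVal]
  rw [List.flatMap_congr hbody]
  have hlen : PySem.List.len map_ = (map_.length : Int) := by simp
  rw [hlen]
  exact window_flatMap 0 (map_.length : Int) lo hi
    (fun i => pvVal map_ i (t i))
    (fun i => 0 ≤ t i ∧ t i < ((PySem.List.pyGetD map_ 0 []).length : Int)) hwin

lemma bucket_col (map_ : List (List String)) (k : Int) (h0 : 0 ≤ k)
    (hw : k < ((PySem.List.pyGetD map_ 0 []).length : Int)) :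
    (pvBucket ((PySem.List.enumerate map_).flatMap (fun p =>
        (PySem.List.pyRange 0 ((PySem.List.pyGetD map_ 0 []).length : Int) 1).map
          (fun j => (p.1, j, PySem.List.pyGetD p.2 j "")))) (fun _ j => j)).getD k []
    = (PySem.List.pyRange 0 (map_.length : Int) 1).map (fun i => pvVal map_ i k) := by
  rw [pvBucket_getD, PySem.List.enumerate_eq_map_pyRange map_ [],
    List.flatMap_map, List.filter_flatMap, List.map_flatMap]
  have hbody : ∀ x ∈ PySem.List.pyRange 0 (PySem.List.len map_) 1,
      ((( PySem.List.pyRange 0 ((PySem.List.pyGetD map_ 0 []).length : Int) 1).map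
          (fun j => (x, j, PySem.List.pyGetD (PySem.List.pyGetD map_ x []) j ""))).filter
            (fun c => c.2.1 == k)).map (fun c => c.2.2)
      = [pvVal map_ x k] := by
    intro x hx
    rw [List.filter_map,
      filter_single ((PySem.List.pyGetD map_ 0 []).length : Int) k _ (fun j => by by_cases hjk : j = k <;> simp [hjk])]
    rw [if_pos ⟨h0, hw⟩]; simp [pvVal]
  rw [List.flatMap_congr hbody]
  have hlen : PySem.List.len map_ = (map_.length : Int) := by simp
  rw [hlen]
  simp [← List.map_eq_flatMap]

lemma pvGetDiag_down (map_ : List (List String)) (d : Int) (fuel : Nat) (r : Int)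
    (hr : 0 ≤ r) (hc : 0 ≤ r - d)
    (hfl : (((PySem.List.pyGetD map_ 0 []).length : Int) - (r - d)).toNat < fuel) :
    pvGetDiag map_ fuel r (r - d) (1, 1) =
      (PySem.List.pyRange r
        (min (map_.length : Int) (((PySem.List.pyGetD map_ 0 []).length : Int) + d)) 1).map
        (fun i => pvVal map_ i (i - d)) := by
  induction fuel generalizing r with
  | zero => omega
  | succ n ih =>
    rw [pvGetDiag]
    set h : Int := (map_.length : Int) with hh
    set w : Int := ((PySem.List.pyGetD map_ 0 []).length : Int) with hw
    split_ifs with hcond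
    · rw [PySem.List.pyRange_one_cons (by omega), List.map_cons]
      refine congrArg₂ _ rfl ?_
      have : r - d + 1 = (r + 1) - d := by omega
      rw [this]
      exact ih (r + 1) (by omega) (by omega) (by omega)
    · rw [PySem.List.pyRange_one_eq_nil (by omega), List.map_nil]

lemma pvGetDiag_up (map_ : List (List String)) (s : Int) (fuel : Nat) (r : Int)
    (hrh : r < (map_.length : Int)) (hsr : 0 ≤ s - r)
    (hfl : (((PySem.List.pyGetD map_ 0 []).length : Int) - (s - r)).toNat < fuel) :
    pvGetDiag map_ fuel r (s - r) (-1, 1) =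
      (PySem.List.pyRange r
        (max (-1) (s - ((PySem.List.pyGetD map_ 0 []).length : Int))) (-1)).map
        (fun i => pvVal map_ i (s - i)) := by
  induction fuel generalizing r with
  | zero => omega
  | succ n ih =>
    rw [pvGetDiag]
    set h : Int := (map_.length : Int) with hh
    set w : Int := ((PySem.List.pyGetD map_ 0 []).length : Int) with hw
    split_ifs with hcond
    · rw [PySem.List.pyRange_neg_one_cons (by omega), List.map_cons]
      refine congrArg₂ _ rfl ?_
      have : s - r + 1 = s - (r - 1) := by omega
      rw [this]
      exact ih (r - 1) (by omega) (by omega) (by omega)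
    · rw [PySem.List.pyRange_neg_one_eq_nil (by omega), List.map_nil]

lemma int_beq_eq_decide (x y : Int) : (x == y) = decide (x = y) := by
  by_cases h : x = y <;> simp [h]

-- ===== VERDICT (by name: the statement is the Claim_ definition above) =====
theorem searchable_lines_spec : Claim_equal_searchable_lines := by
  intro map_ _ _
  unfold Spec_searchable_lines
  simp only [searchable_lines, searchable_lines_alt]
  have hcols :
      (PySem.List.pyRange 0 ((PySem.List.pyGetD map_ 0 []).length : Int) 1).map (fun j =>
        PySem.Str.join "" ((PySem.List.pyRange 0 ((map_.length : Int)) 1).map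
          (fun i => PySem.List.pyGetD (PySem.List.pyGetD map_ i []) j "")))
      = (PySem.List.pyRange 0 ((PySem.List.pyGetD map_ 0 []).length : Int) 1).map (fun j =>
        PySem.Str.join "" ((pvBucket ((PySem.List.enumerate map_).flatMap (fun p =>
          (PySem.List.pyRange 0 ((PySem.List.pyGetD map_ 0 []).length : Int) 1).map
            (fun j => (p.1, j, PySem.List.pyGetD p.2 j "")))) (fun _ j => j)).getD j [])) := by
    refine List.map_congr_left (fun j hj => ?_)
    have hb := PySem.List.mem_pyRange_one.mp hj
    rw [bucket_col map_ j hb.1 hb.2]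
    simp [pvVal]
  have hseg1 :
      (PySem.List.pyRange 0 ((PySem.List.pyGetD map_ 0 []).length : Int) 1).map (fun col =>
        PySem.Str.join "" (pvGetDiag map_ (((PySem.List.pyGetD map_ 0 []).length : Int).toNat + 1) 0 col (1, 1)))
      = (PySem.List.pyRange 0 ((PySem.List.pyGetD map_ 0 []).length : Int) 1).map (fun c =>
        PySem.Str.join "" ((pvBucket ((PySem.List.enumerate map_).flatMap (fun p =>
          (PySem.List.pyRange 0 ((PySem.List.pyGetD map_ 0 []).length : Int) 1).map
            (fun j => (p.1, j, PySem.List.pyGetD p.2 j "")))) (fun i j => i - j)).getD (-c) [])) := by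
    refine List.map_congr_left (fun col hcol => ?_)
    have hb := PySem.List.mem_pyRange_one.mp hcol
    have hd := pvGetDiag_down map_ (-col) (((PySem.List.pyGetD map_ 0 []).length : Int).toNat + 1) 0 (le_refl 0) (by omega) (by omega)
    rw [show (0 : Int) - -col = col from by omega] at hd
    rw [hd, bucket_range map_ (fun i j => i - j) (-col) (fun i => i - -col) (-col)
      (((PySem.List.pyGetD map_ 0 []).length : Int) + -col)
      (fun i x => by rw [int_beq_eq_decide]; simp only [decide_eq_decide]; omega)
      (fun i => by beta_reduce; omega)]
    rw [show max 0 (-col) = (0 : Int) from by omega]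
  have hseg2 :
      (PySem.List.pyRange 1 ((map_.length : Int)) 1).map (fun row =>
        PySem.Str.join "" (pvGetDiag map_ (((PySem.List.pyGetD map_ 0 []).length : Int).toNat + 1) row 0 (1, 1)))
      = (PySem.List.pyRange 1 ((map_.length : Int)) 1).map (fun r =>
        PySem.Str.join "" ((pvBucket ((PySem.List.enumerate map_).flatMap (fun p =>
          (PySem.List.pyRange 0 ((PySem.List.pyGetD map_ 0 []).length : Int) 1).map
            (fun j => (p.1, j, PySem.List.pyGetD p.2 j "")))) (fun i j => i - j)).getD r [])) := by
    refine List.map_congr_left (fun row hrow => ?_)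
    have hb := PySem.List.mem_pyRange_one.mp hrow
    have hd := pvGetDiag_down map_ row (((PySem.List.pyGetD map_ 0 []).length : Int).toNat + 1) row (by omega) (by omega) (by omega)
    rw [show row - row = (0 : Int) from by omega] at hd
    rw [hd, bucket_range map_ (fun i j => i - j) row (fun i => i - row) row
      (((PySem.List.pyGetD map_ 0 []).length : Int) + row)
      (fun i x => by rw [int_beq_eq_decide]; simp only [decide_eq_decide]; omega)
      (fun i => by beta_reduce; omega)]
    rw [show max 0 row = row from by omega]
  have hseg3 :
      (PySem.List.pyRange 0 ((PySem.List.pyGetD map_ 0 []).length : Int) 1).map (fun col =>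
        PySem.Str.join "" (pvGetDiag map_ (((PySem.List.pyGetD map_ 0 []).length : Int).toNat + 1) (((map_.length : Int)) - 1) col (-1, 1)))
      = (PySem.List.pyRange 0 ((PySem.List.pyGetD map_ 0 []).length : Int) 1).map (fun c =>
        PySem.Str.join "" ((pvBucket ((PySem.List.enumerate map_).flatMap (fun p =>
          (PySem.List.pyRange 0 ((PySem.List.pyGetD map_ 0 []).length : Int) 1).map
            (fun j => (p.1, j, PySem.List.pyGetD p.2 j "")))) (fun i j => i + j)).getD
          (((map_.length : Int)) - 1 + c) []).reverse) := by
    refine List.map_congr_left (fun col hcol => ?_)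
    have hb := PySem.List.mem_pyRange_one.mp hcol
    have hu := pvGetDiag_up map_ (((map_.length : Int)) - 1 + col) (((PySem.List.pyGetD map_ 0 []).length : Int).toNat + 1) (((map_.length : Int)) - 1)
      (by omega) (by omega) (by omega)
    rw [show ((map_.length : Int)) - 1 + col - (((map_.length : Int)) - 1) = col from by omega] at hu
    rw [hu, bucket_range map_ (fun i j => i + j) (((map_.length : Int)) - 1 + col)
      (fun i => ((map_.length : Int)) - 1 + col - i) (((map_.length : Int)) - 1 + col - ((PySem.List.pyGetD map_ 0 []).length : Int) + 1) (((map_.length : Int)) - 1 + col + 1)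
      (fun i x => by rw [int_beq_eq_decide]; simp only [decide_eq_decide]; omega)
      (fun i => by beta_reduce; omega)]
    rw [PySem.List.pyRange_neg_one_eq_reverse, List.map_reverse]
    rw [show max (-1) (((map_.length : Int)) - 1 + col - ((PySem.List.pyGetD map_ 0 []).length : Int)) + 1 = max 0 (((map_.length : Int)) - 1 + col - ((PySem.List.pyGetD map_ 0 []).length : Int) + 1) from by omega]
    rw [show ((map_.length : Int)) - 1 + 1 = min ((map_.length : Int)) (((map_.length : Int)) - 1 + col + 1) from by omega]
  have hseg4 :
      (PySem.List.pyRange (((map_.length : Int)) - 2) (-1) (-1)).map (fun row =>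
        PySem.Str.join "" (pvGetDiag map_ (((PySem.List.pyGetD map_ 0 []).length : Int).toNat + 1) row 0 (-1, 1)))
      = (PySem.List.pyRange (((map_.length : Int)) - 2) (-1) (-1)).map (fun r =>
        PySem.Str.join "" ((pvBucket ((PySem.List.enumerate map_).flatMap (fun p =>
          (PySem.List.pyRange 0 ((PySem.List.pyGetD map_ 0 []).length : Int) 1).map
            (fun j => (p.1, j, PySem.List.pyGetD p.2 j "")))) (fun i j => i + j)).getD r []).reverse) := by
    refine List.map_congr_left (fun row hrow => ?_)
    have hb := PySem.List.mem_pyRange_neg_one.mp hrow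
    have hu := pvGetDiag_up map_ row (((PySem.List.pyGetD map_ 0 []).length : Int).toNat + 1) row (by omega) (by omega) (by omega)
    rw [show row - row = (0 : Int) from by omega] at hu
    rw [hu, bucket_range map_ (fun i j => i + j) row
      (fun i => row - i) (row - ((PySem.List.pyGetD map_ 0 []).length : Int) + 1) (row + 1)
      (fun i x => by rw [int_beq_eq_decide]; simp only [decide_eq_decide]; omega)
      (fun i => by beta_reduce; omega)]
    rw [PySem.List.pyRange_neg_one_eq_reverse, List.map_reverse]
    rw [show max (-1) (row - ((PySem.List.pyGetD map_ 0 []).length : Int)) + 1 = max 0 (row - ((PySem.List.pyGetD map_ 0 []).length : Int) + 1) from by omega]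
    rw [show min ((map_.length : Int)) (row + 1) = row + 1 from by omega]
  rw [hcols, hseg1, hseg2, hseg3, hseg4,
    show (fun s => (PySem.Str.slice? s none none (-1)).getD "") = pvRevA from
      funext (fun s => (pvRevA_eq s).symm)]
  simp [List.append_assoc]
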